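-- pv_equiv track=rewrite | github.com/Timmhxw/Noelle_Calculator | ui_tk.py | cut_map
-- ===== SOURCE A (Python) =====
-- def cut_map(m):
--     s= '\t{'
--     i=0
--     for k,v in m.items():
--         s = s + "%s:%s  "%(k,v)
--         i=(i+1)%4
--         if i==0:
--             s = s+'\n\t'
--     while(s[-1]in[' ','\n','\t']):
--         s = s[:-1]
--     return s+'}'
-- ===== SOURCE B (Python) =====
-- def cut_map(m):
--     parts = ["%s:%s  " % (k, v) for k, v in m.items()]
--     rows = []
--     i = 0
--     while i < len(parts):
--         rows.append(''.join(parts[i:i+4]))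
--         i += 4
--     return ('\t{' + '\n\t'.join(rows)).rstrip(' \n\t') + '}'
-- ===== Notes on version B (the rewrite author's own statement) =====
-- stated objective: alternative
-- what changed: B builds the list of formatted entry strings once, chunks it into rows of 4 by index slicing and joins the rows with '\n\t', then removes trailing ' \n\t' with one rstrip, replacing A's running modulo-4 counter with in-loop separator insertion and its char-by-char while-loop strip.
import Mathlib
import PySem

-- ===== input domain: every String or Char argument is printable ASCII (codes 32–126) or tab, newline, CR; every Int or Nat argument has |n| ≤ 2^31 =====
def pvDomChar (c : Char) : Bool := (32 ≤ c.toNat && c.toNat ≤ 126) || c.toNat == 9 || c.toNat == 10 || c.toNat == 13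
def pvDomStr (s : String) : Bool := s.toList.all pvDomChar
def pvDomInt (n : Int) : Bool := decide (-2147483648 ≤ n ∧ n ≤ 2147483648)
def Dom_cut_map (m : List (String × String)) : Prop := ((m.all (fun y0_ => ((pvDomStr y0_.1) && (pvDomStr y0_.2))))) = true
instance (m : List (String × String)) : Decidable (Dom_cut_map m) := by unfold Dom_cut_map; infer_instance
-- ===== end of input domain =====

-- B replaces A's running modulo-4 counter and char-by-char while-loop strip by: build the list of
-- formatted parts, chunk it into rows of 4, join rows with "\n\t", one rstrip(' \n\t'). Alternative
-- decomposition, same cost.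

-- ===== PORT A =====
-- A's `while s[-1] in [' ','\n','\t']: s = s[:-1]`; s[-1] would raise IndexError on the empty
-- string, but s always starts with '\t{' and '{' is never stripped, so the none branch is unreachable.
def cutAStrip (cs : List Char) : List Char :=
  match h : cs.getLast? with
  | some c => if c = ' ' ∨ c = '\n' ∨ c = '\t' then cutAStrip cs.dropLast else cs
  | none => cs
termination_by cs.length
decreasing_by
  have hne : cs ≠ [] := by intro e; subst e; simp at h
  have := List.length_pos_of_ne_nil hne
  simp [List.length_dropLast]; omega

-- the Python caller passes a dict; the assoc-list argument is read as that dict (insertion order, last value wins)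
def cut_map (m : List (String × String)) : String :=
  let res := (PySem.Dict.ofList m).items.foldl
    (fun (si : String × Int) kv =>
      let s := si.1 ++ (kv.1 ++ ":" ++ kv.2 ++ "  ");   -- s = s + "%s:%s  " % (k, v)
      let i := PySem.Int.mod (si.2 + 1) 4;              -- i = (i+1) % 4
      (if i = 0 then s ++ "\n\t" else s, i))
    ("\t{", 0)
  String.mk (cutAStrip res.1.toList) ++ "}"

-- ===== PORT B =====
-- while i < len(parts): rows.append(''.join(parts[i:i+4])); i += 4
def cutBRows (parts : List String) (i : Nat) : List String :=
  if i < parts.length then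
    String.join (PySem.List.slice parts (some (i : Int)) (some ((i : Int) + 4))) :: cutBRows parts (i + 4)
  else []
termination_by parts.length - i

-- s.rstrip(' \n\t'): drop trailing characters of that set (exact: char-set rstrip, hand-ported)
def cutBRstrip (cs : List Char) : List Char :=
  (cs.reverse.dropWhile (fun c => c == ' ' || c == '\n' || c == '\t')).reverse

def cut_map_alt (m : List (String × String)) : String :=
  let parts := (PySem.Dict.ofList m).items.map (fun kv => kv.1 ++ ":" ++ kv.2 ++ "  ")
  let s := "\t{" ++ PySem.Str.join "\n\t" (cutBRows parts 0)
  String.mk (cutBRstrip s.toList) ++ "}"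

-- ===== PRECONDITION & SPEC =====
def Spec_cut_map (m : List (String × String)) (out : String) : Prop := out = cut_map_alt m
instance (m : List (String × String)) (out : String) : Decidable (Spec_cut_map m out) := by unfold Spec_cut_map; infer_instance

-- ===== CLAIM (what is proved, stated in full; the proofs are below) =====
def Claim_equal_cut_map : Prop := ∀ (m : List (String × String)), Dom_cut_map m → Spec_cut_map m (cut_map m)

-- ===== LEMMAS AND PROOFS =====

-- B's row loop, re-expressed as structural recursion on the remaining parts
def cutChunks (ps : List String) : List String :=
  if ps = [] then []
  else String.join (ps.take 4) :: cutChunks (ps.drop 4)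
termination_by ps.length
decreasing_by
  have := List.length_pos_of_ne_nil (by assumption)
  simp; omega

theorem cutChunks_nil : cutChunks [] = [] := by simp [cutChunks]

theorem cutChunks_eq_nil_iff (ps : List String) : cutChunks ps = [] ↔ ps = [] := by
  constructor
  · intro h
    by_contra hne
    rw [cutChunks, if_neg hne] at h
    simp at h
  · intro h; simp [h, cutChunks_nil]

theorem cutBRows_eq_cutChunks (n : Nat) : ∀ (parts : List String) (i : Nat),
    parts.length - i ≤ n → cutBRows parts i = cutChunks (parts.drop i) := by
  induction n with
  | zero =>
    intro parts i h
    have hge : parts.length ≤ i := by omega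
    rw [cutBRows, if_neg (by omega), List.drop_eq_nil_of_le hge, cutChunks_nil]
  | succ n ih =>
    intro parts i h
    by_cases hlt : i < parts.length
    · rw [cutBRows, if_pos hlt]
      have hslice : PySem.List.slice parts (some (i : Int)) (some ((i : Int) + 4))
          = (parts.drop i).take 4 := by
        rw [show ((i : Int) + 4) = ((i + 4 : Nat) : Int) by push_cast; ring]
        rw [PySem.List.slice_natCast]
        simp
      have hrec : parts.length - (i + 4) ≤ n := by omega
      rw [hslice, ih parts (i + 4) hrec]
      conv_rhs => rw [cutChunks]
      rw [if_neg (by simp only [List.drop_eq_nil_iff]; omega)]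
      have hd : parts.drop (i + 4) = (parts.drop i).drop 4 := by
        rw [List.drop_drop, Nat.add_comm]
      rw [hd]
    · rw [cutBRows, if_neg hlt, List.drop_eq_nil_of_le (by omega), cutChunks_nil]


-- A's loop body, after the items pair has been formatted
def cutG (si : String × Int) (part : String) : String × Int :=
  let s := si.1 ++ part
  let i := PySem.Int.mod (si.2 + 1) 4
  (if i = 0 then s ++ "\n\t" else s, i)

theorem cutG_fold_eq (l : List (String × String)) (si : String × Int) :
    l.foldl (fun (si : String × Int) kv =>
      let s := si.1 ++ (kv.1 ++ ":" ++ kv.2 ++ "  ");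
      let i := PySem.Int.mod (si.2 + 1) 4;
      (if i = 0 then s ++ "\n\t" else s, i)) si
    = (l.map (fun kv => kv.1 ++ ":" ++ kv.2 ++ "  ")).foldl cutG si := by
  rw [List.foldl_map]; rfl

theorem cutJoin_from (t : List String) : ∀ a : String,
    t.foldl (fun r s => r ++ s) a = a ++ String.join t := by
  induction t with
  | nil => intro a; simp [String.join]
  | cons b t ih =>
    intro a
    simp only [List.foldl_cons]
    rw [ih]
    have : String.join (b :: t) = b ++ String.join t := by
      simp only [String.join, List.foldl_cons]
      rw [ih]
      simp [String.join]
    rw [this, String.append_assoc]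

theorem cutG_small (ps : List String) (s : String) (i : Int)
    (h0 : 0 ≤ i) (h4 : i.toNat + ps.length < 4) :
    ps.foldl cutG (s, i) = (s ++ String.join ps, i + ps.length) := by
  induction ps generalizing s i with
  | nil => simp [String.join]
  | cons a t ih =>
    have h1 : i + 1 < 4 := by simp only [List.length_cons] at h4; omega
    have hm : PySem.Int.mod (i + 1) 4 = i + 1 := by
      simp [PySem.Int.mod]; rw [Int.fmod_eq_emod]; omega
    have hne : ¬ (i + 1 = 0) := by omega
    have ht : (i + 1).toNat + t.length < 4 := by
      simp only [List.length_cons] at h4; omega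
    simp only [List.foldl_cons, cutG, hm, if_neg hne]
    rw [ih (s ++ a) (i + 1) (by omega) ht]
    have hj : String.join (a :: t) = a ++ String.join t := by
      simp only [String.join, List.foldl_cons]
      rw [cutJoin_from, cutJoin_from]
      simp
    rw [hj, List.length_cons]
    simp [String.append_assoc]
    omega

theorem cutG_step4 (a b c d : String) (rest : List String) (s : String) :
    (a :: b :: c :: d :: rest).foldl cutG (s, 0)
    = rest.foldl cutG (s ++ a ++ b ++ c ++ d ++ "\n\t", 0) := by
  simp [cutG, PySem.Int.mod, String.append_assoc]

theorem join_cons_ne (sep : String) (x : String) (rows : List String) (h : rows ≠ []) :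
    PySem.Str.join sep (x :: rows) = x ++ sep ++ PySem.Str.join sep rows := by
  cases rows with
  | nil => exact absurd rfl h
  | cons y t =>
    apply String.toList_inj.mp
    simp only [PySem.Str.toList_join, List.map_cons]
    rw [PySem.Chars.join_cons_cons]
    simp

-- the invariant of A's loop: its string is B's joined rows, plus the trailing "\n\t" that
-- A appends after every complete group of four (stripped later)
theorem cutG_main (n : Nat) : ∀ (ps : List String), ps.length ≤ n → ∀ (s : String),
    (ps.foldl cutG (s, 0)).1
    = s ++ PySem.Str.join "\n\t" (cutChunks ps)
        ++ (if ps ≠ [] ∧ ps.length % 4 = 0 then "\n\t" else "") := by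
  induction n with
  | zero =>
    intro ps hlen s
    have : ps = [] := List.eq_nil_of_length_eq_zero (by omega)
    subst this
    simp [cutChunks_nil, PySem.Str.join]
  | succ n ih =>
    intro ps hlen s
    match ps with
    | [] => simp [cutChunks_nil, PySem.Str.join]
    | a :: b :: c :: d :: rest =>
      rw [cutG_step4]
      have hr : rest.length ≤ n := by simp at hlen; omega
      rw [ih rest hr]
      have hrows : cutChunks (a :: b :: c :: d :: rest)
          = String.join [a, b, c, d] :: cutChunks rest := by
        rw [cutChunks]; simp
      rw [hrows]
      by_cases hrest : rest = []
      · subst hrest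
        simp only [cutChunks_nil]
        apply String.toList_inj.mp
        simp [PySem.Chars.join_singleton, PySem.Chars.join_nil, String.join]
      · rw [join_cons_ne _ _ _ (by rw [Ne, cutChunks_eq_nil_iff]; exact hrest)]
        have hm : (a :: b :: c :: d :: rest).length % 4 = rest.length % 4 := by
          simp only [List.length_cons]; omega
        rw [hm]
        simp only [ne_eq, hrest, not_false_eq_true, true_and,
          List.cons_ne_nil]
        apply String.toList_inj.mp
        simp [String.join]
    | [a] =>
      rw [cutG_small _ _ _ (by omega) (by simp)]
      rw [cutChunks]
      apply String.toList_inj.mp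
      simp [cutChunks_nil, PySem.Chars.join_singleton, String.join]
    | [a, b] =>
      rw [cutG_small _ _ _ (by omega) (by simp)]
      rw [cutChunks]
      apply String.toList_inj.mp
      simp [cutChunks_nil, PySem.Chars.join_singleton, String.join]
    | [a, b, c] =>
      rw [cutG_small _ _ _ (by omega) (by simp)]
      rw [cutChunks]
      apply String.toList_inj.mp
      simp [cutChunks_nil, PySem.Chars.join_singleton, String.join]

-- A's one-char-at-a-time while loop is exactly rstrip over the same character set
theorem cutAStrip_eq_rstrip (n : Nat) : ∀ (cs : List Char), cs.length ≤ n →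
    cutAStrip cs = cutBRstrip cs := by
  induction n with
  | zero =>
    intro cs h
    have : cs = [] := List.eq_nil_of_length_eq_zero (by omega)
    subst this; simp [cutAStrip, cutBRstrip]
  | succ n ih =>
    intro cs h
    match hcs : cs.getLast? with
    | none =>
      have : cs = [] := List.getLast?_eq_none_iff.mp hcs
      subst this; simp [cutAStrip, cutBRstrip]
    | some c =>
      obtain ⟨init, hinit⟩ := List.getLast?_eq_some_iff.mp hcs
      have hdl : cs.dropLast = init := by subst hinit; simp
      have hstep : cutAStrip cs
          = if c = ' ' ∨ c = '\n' ∨ c = '\t' then cutAStrip cs.dropLast else cs := by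
        rw [cutAStrip, hcs]
      rw [hstep]
      by_cases hc : c = ' ' ∨ c = '\n' ∨ c = '\t'
      · rw [if_pos hc]
        have hlen : cs.dropLast.length ≤ n := by
          have hl : cs.length = init.length + 1 := by rw [hinit]; simp
          rw [hdl]; omega
        rw [ih _ hlen, hdl]
        unfold cutBRstrip
        conv_rhs => rw [hinit]
        rw [List.reverse_append]
        simp only [List.reverse_cons, List.reverse_nil, List.nil_append, List.cons_append,
          List.dropWhile_cons]
        have hb : (c == ' ' || c == '\n' || c == '\t') = true := by
          rcases hc with h | h | h <;> simp [h]
        simp [hb]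
      · rw [if_neg hc]
        unfold cutBRstrip
        conv_rhs => rw [hinit]
        rw [List.reverse_append]
        simp only [List.reverse_cons, List.reverse_nil, List.nil_append, List.cons_append,
          List.dropWhile_cons]
        have hb : (c == ' ' || c == '\n' || c == '\t') = false := by
          rw [not_or, not_or] at hc
          simp [hc.1, hc.2.1, hc.2.2]
        simp [hb]
        exact hinit

theorem cutBRstrip_append_nt (x : List Char) :
    cutBRstrip (x ++ ['\n', '\t']) = cutBRstrip x := by
  unfold cutBRstrip
  simp [List.reverse_append]

-- ===== VERDICT (by name: the statement is the Claim_ definition above) =====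
theorem cut_map_spec : Claim_equal_cut_map := by
  intro m _
  unfold Spec_cut_map cut_map cut_map_alt
  dsimp only
  rw [cutG_fold_eq, cutBRows_eq_cutChunks (List.map (fun kv => kv.1 ++ ":" ++ kv.2 ++ "  ") (PySem.Dict.ofList m).items).length _ 0 (by omega), List.drop_zero]
  set ps := (PySem.Dict.ofList m).items.map (fun kv => kv.1 ++ ":" ++ kv.2 ++ "  ") with hps
  rw [cutG_main ps.length ps le_rfl "\t{"]
  rw [cutAStrip_eq_rstrip _ _ le_rfl]
  congr 2
  by_cases hflag : ps ≠ [] ∧ ps.length % 4 = 0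
  · rw [if_pos hflag]
    have : ("\t{" ++ PySem.Str.join "\n\t" (cutChunks ps) ++ "\n\t").toList
        = ("\t{" ++ PySem.Str.join "\n\t" (cutChunks ps)).toList ++ ['\n', '\t'] := by
      simp
    rw [this, cutBRstrip_append_nt]
  · rw [if_neg hflag]
    congr 1
    simp
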